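-- pv_equiv track=rewrite | github.com/mil07n/AI202-ARTIFICIAL-INTELLIGENCE-LAB | 5_Q1.py | run_ids
-- ===== SOURCE A (Python) =====
-- TOTAL_G = 3
--
-- TOTAL_B = 3
--
-- MOVES = [(1,0),(2,0),(0,1),(0,2),(1,1)]
--
-- def valid_state(g_left, b_left):
--     g_right = TOTAL_G - g_left
--     b_right = TOTAL_B - b_left
--     if g_left < 0 or b_left < 0 or g_left > TOTAL_G or b_left > TOTAL_B:
--         return False
--     if g_left > 0 and b_left > g_left:
--         return False
--     if g_right > 0 and b_right > g_right:
--         return False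
--     return True
--
-- def successors(state):
--     g_left, b_left, boat = state
--     next_states = []
--     for g, b in MOVES:
--         if boat == 0:
--             new_state = (g_left - g, b_left - b, 1)
--         else:
--             new_state = (g_left + g, b_left + b, 0)
--         if valid_state(new_state[0], new_state[1]):
--             next_states.append(new_state)
--     return next_states
--
-- def dls(state, goal, depth, path, visited):
--     if state == goal:
--         return path
--     if depth == 0:
--         return None
--     for next_state in successors(state):
--         if next_state not in visited:
--             visited.add(next_state)
--             result = dls(next_state, goal, depth-1,
--             path + [next_state], visited)
--             if result:
--                 return result
--             visited.remove(next_state)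
--     return None
--
-- def run_ids(start_limit):
--     start = (3,3,0)
--     goal = (0,0,1)
--     depth = start_limit
--     while True:
--         result = dls(start, goal, depth, [start], {start})
--         if result:
--             return result, depth
--         depth += 1   # increase depth automatically
-- ===== SOURCE B (Python) =====
-- TOTAL_G = 3
--
-- TOTAL_B = 3
--
-- MOVES = [(1,0),(2,0),(0,1),(0,2),(1,1)]
--
-- def valid_state(g_left, b_left):
--     g_right = TOTAL_G - g_left
--     b_right = TOTAL_B - b_left
--     if g_left < 0 or b_left < 0 or g_left > TOTAL_G or b_left > TOTAL_B:
--         return False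
--     if g_left > 0 and b_left > g_left:
--         return False
--     if g_right > 0 and b_right > g_right:
--         return False
--     return True
--
-- def successors(state):
--     g_left, b_left, boat = state
--     next_states = []
--     for g, b in MOVES:
--         if boat == 0:
--             new_state = (g_left - g, b_left - b, 1)
--         else:
--             new_state = (g_left + g, b_left + b, 0)
--         if valid_state(new_state[0], new_state[1]):
--             next_states.append(new_state)
--     return next_states
--
-- def dls(start, goal, depth):
--     # iterative depth-limited DFS; the recursive version's visited set always
--     # equals set(path), so membership in path replaces it
--     stack = [(start, [start])]
--     while stack:
--         state, path = stack.pop()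
--         if state == goal:
--             return path
--         if depth - (len(path) - 1) != 0:
--             for next_state in reversed(successors(state)):
--                 if next_state not in path:
--                     stack.append((next_state, path + [next_state]))
--     return None
--
-- def run_ids(start_limit):
--     start = (3,3,0)
--     goal = (0,0,1)
--     depth = start_limit
--     while True:
--         result = dls(start, goal, depth)
--         if result:
--             return result, depth
--         depth += 1
-- ===== Notes on version B (the rewrite author's own statement) =====
-- stated objective: alternative
-- what changed: The recursive depth-limited search dls (with its mutated visited set) is replaced by an explicit stack-based iterative DFS over (state, path) pairs whose 'next_state not in path' test subsumes the visited set; the iterative-deepening driver loop is unchanged.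
import Mathlib
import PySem

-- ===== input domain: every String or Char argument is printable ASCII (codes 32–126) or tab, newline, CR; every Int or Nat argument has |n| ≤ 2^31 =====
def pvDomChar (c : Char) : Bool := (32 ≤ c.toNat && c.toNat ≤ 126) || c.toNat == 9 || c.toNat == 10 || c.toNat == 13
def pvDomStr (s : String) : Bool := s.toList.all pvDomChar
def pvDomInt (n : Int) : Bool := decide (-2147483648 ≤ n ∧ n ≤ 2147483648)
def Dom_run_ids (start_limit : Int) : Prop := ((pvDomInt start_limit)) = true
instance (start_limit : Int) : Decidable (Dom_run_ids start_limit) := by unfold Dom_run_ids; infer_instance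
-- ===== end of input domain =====

-- B replaces A's recursive depth-limited search by an explicit stack-based iterative
-- DFS whose `next_state not in path` test subsumes A's separate `visited` set
-- (objective: alternative decomposition, same cost).

-- ===== PORT A =====
-- shared helpers (identical source code in both Python files)
abbrev pvState := Int × Int × Int

def pvMOVES : List (Int × Int) := [(1,0),(2,0),(0,1),(0,2),(1,1)]

def pvValidState (g_left b_left : Int) : Bool :=
  let g_right := 3 - g_left
  let b_right := 3 - b_left
  if g_left < 0 || b_left < 0 || g_left > 3 || b_left > 3 then false
  else if g_left > 0 && b_left > g_left then false
  else if g_right > 0 && b_right > g_right then false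
  else true

def pvSuccessors (s : pvState) : List pvState :=
  pvMOVES.foldl (fun acc m =>
    let ns : pvState :=
      if s.2.2 = 0 then (s.1 - m.1, s.2.1 - m.2, 1) else (s.1 + m.1, s.2.1 + m.2, 0)
    if pvValidState ns.1 ns.2.1 then acc ++ [ns] else acc) []

-- the `for next_state in successors(state)` loop of A's dls; `recur` is the recursive call
def pvDlsALoop (recur : pvState → List pvState → PySem.Set pvState → Option (List pvState)) :
    List pvState → List pvState → PySem.Set pvState → Option (List pvState)
  | [], _, _ => none
  | n :: rest, path, visited =>
    if n ∈ visited then pvDlsALoop recur rest path visited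
    else
      -- visited.add n; on failure Python removes n again, so the original `visited` is reused
      match recur n (path ++ [n]) (PySem.Set.add visited n) with
      | some r => some r   -- `if result:` — r is a nonempty path, hence truthy
      | none => pvDlsALoop recur rest path visited

-- A's recursive dls; `fuel` only makes the recursion total (never exhausted on real runs)
def pvDlsA : Nat → pvState → pvState → Int → List pvState → PySem.Set pvState →
    Option (List pvState)
  | 0, _, _, _, _, _ => none
  | fuel + 1, state, goal, depth, path, visited =>
    if state = goal then some path
    else if depth = 0 then none
    else pvDlsALoop (fun n p v => pvDlsA fuel n goal (depth - 1) p v)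
           (pvSuccessors state) path visited

def pvStart : pvState := (3, 3, 0)
def pvGoal : pvState := (0, 0, 1)

def pvRunLoopA : Nat → Int → List pvState × Int
  | 0, _ => ([], 0)   -- unreachable with the fuel chosen below
  | fuel + 1, depth =>
    match pvDlsA 32 pvStart pvGoal depth [pvStart] (PySem.Set.ofList [pvStart]) with
    | some r => (r, depth)
    | none => pvRunLoopA fuel (depth + 1)

def run_ids (start_limit : Int) : List (List Int) × Int :=
  let r := pvRunLoopA ((12 - start_limit).toNat + 1) start_limit
  (r.1.map (fun s => [s.1, s.2.1, s.2.2]), r.2)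

-- ===== PORT B =====
-- B's iterative dls: stack of (state, path); head of the list is the top of the stack
def pvDlsB : Nat → pvState → Int → List (pvState × List pvState) → Option (List pvState)
  | 0, _, _, _ => none   -- fuel guard only, never hit on real runs
  | fuel + 1, goal, depth, stack =>
    match stack with
    | [] => none
    | (state, path) :: rest =>
      if state = goal then some path
      else if depth - (path.length - 1) ≠ 0 then
        pvDlsB fuel goal depth
          ((pvSuccessors state).reverse.foldl
            (fun s n => if n ∈ path then s else (n, path ++ [n]) :: s) rest)
      else pvDlsB fuel goal depth rest

def pvRunLoopB : Nat → Int → List pvState × Int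
  | 0, _ => ([], 0)   -- unreachable with the fuel chosen below
  | fuel + 1, depth =>
    match pvDlsB 64 pvGoal depth [(pvStart, [pvStart])] with
    | some r => (r, depth)
    | none => pvRunLoopB fuel (depth + 1)

def run_ids_alt (start_limit : Int) : List (List Int) × Int :=
  let r := pvRunLoopB ((12 - start_limit).toNat + 1) start_limit
  (r.1.map (fun s => [s.1, s.2.1, s.2.2]), r.2)

-- ===== PRECONDITION & SPEC =====
def Spec_run_ids (start_limit : Int) (out : List (List Int) × Int) : Prop := out = run_ids_alt start_limit
instance (start_limit : Int) (out : List (List Int) × Int) : Decidable (Spec_run_ids start_limit out) := by unfold Spec_run_ids; infer_instance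

-- ===== CLAIM (what is proved, stated in full; the proofs are below) =====
def Claim_equal_run_ids : Prop := ∀ (start_limit : Int), Dom_run_ids start_limit → Spec_run_ids start_limit (run_ids start_limit)

-- ===== LEMMAS AND PROOFS =====

-- the unique solution path both searches find
def pvP : List pvState :=
  [(3,3,0),(3,1,1),(3,2,0),(3,0,1),(3,1,0),(1,1,1),(2,2,0),(0,2,1),(0,3,0),(0,1,1),(1,1,0),(0,0,1)]

-- depth-irrelevance for A: if the counter can never hit 0 within the fuel, its value is irrelevant
theorem pvDlsALoop_congr (recur recur' : pvState → List pvState → PySem.Set pvState → Option (List pvState))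
    (h : ∀ n p v, recur n p v = recur' n p v) :
    ∀ (succs path : List pvState) (visited : PySem.Set pvState),
      pvDlsALoop recur succs path visited = pvDlsALoop recur' succs path visited := by
  intro succs
  induction succs with
  | nil => intro path visited; rfl
  | cons n rest ih =>
    intro path visited
    rw [pvDlsALoop, pvDlsALoop]
    by_cases hv : n ∈ visited
    · simp only [if_pos hv]; exact ih path visited
    · simp only [if_neg hv, h n]
      cases recur' n (path ++ [n]) (PySem.Set.add visited n) with
      | some r => rfl
      | none => exact ih path visited

theorem pvDlsA_irrel (fuel : Nat) :
    ∀ (state goal : pvState) (d d' : Int) (path : List pvState) (visited : PySem.Set pvState),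
      (d < 0 ∨ (fuel : Int) ≤ d) → (d' < 0 ∨ (fuel : Int) ≤ d') →
      pvDlsA fuel state goal d path visited = pvDlsA fuel state goal d' path visited := by
  induction fuel with
  | zero => intro _ _ _ _ _ _ _ _; rfl
  | succ fuel ih =>
    intro state goal d d' path visited hd hd'
    rw [pvDlsA, pvDlsA]
    have h0 : ¬ d = 0 := by omega
    have h0' : ¬ d' = 0 := by omega
    by_cases hg : state = goal
    · simp [hg]
    · simp only [if_neg hg, if_neg h0, if_neg h0']
      exact pvDlsALoop_congr _ _
        (fun n p v => ih n goal (d - 1) (d' - 1) p v (by omega) (by omega)) _ path visited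

-- closed forms for A's dls at the fixed start state
theorem pvDlsA_neg (d : Int) (hd : d < 0 ∨ (32 : Int) ≤ d) :
    pvDlsA 32 pvStart pvGoal d [pvStart] (PySem.Set.ofList [pvStart]) = some pvP := by
  rw [pvDlsA_irrel 32 pvStart pvGoal d (-1) _ _ (by omega) (by omega)]
  decide

theorem pvDlsA_small (d : Int) (h0 : 0 ≤ d) (h1 : d ≤ 10) :
    pvDlsA 32 pvStart pvGoal d [pvStart] (PySem.Set.ofList [pvStart]) = none := by
  interval_cases d <;> decide

theorem pvDlsA_mid (d : Int) (h0 : 11 ≤ d) (h1 : d ≤ 31) :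
    pvDlsA 32 pvStart pvGoal d [pvStart] (PySem.Set.ofList [pvStart]) = some pvP := by
  interval_cases d <;> decide

theorem pvRunLoopA_climb (fuel : Nat) (d : Int) (h0 : 0 ≤ d) (h1 : d ≤ 11)
    (hf : (12 - d).toNat ≤ fuel) : pvRunLoopA fuel d = (pvP, 11) := by
  induction fuel generalizing d with
  | zero => omega
  | succ fuel ih =>
    rw [pvRunLoopA]
    by_cases h : d ≤ 10
    · rw [pvDlsA_small d h0 h]
      exact ih (d + 1) (by omega) (by omega) (by omega)
    · have : d = 11 := by omega
      subst this
      rw [pvDlsA_mid 11 (by omega) (by omega)]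

theorem run_ids_closed (s : Int) :
    run_ids s = (pvP.map (fun st => [st.1, st.2.1, st.2.2]),
                 if 0 ≤ s ∧ s ≤ 10 then 11 else s) := by
  rw [run_ids]
  by_cases hneg : s < 0
  · rw [pvRunLoopA]
    rw [pvDlsA_neg s (Or.inl hneg)]
    simp [hneg]
  · by_cases hsmall : s ≤ 10
    · rw [pvRunLoopA_climb _ s (by omega) (by omega) (by omega)]
      simp
      omega
    · rw [pvRunLoopA]
      by_cases hmid : s ≤ 31
      · rw [pvDlsA_mid s (by omega) (by omega)]
        simp
        omega
      · rw [pvDlsA_neg s (Or.inr (by omega))]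
        simp
        omega

-- depth-irrelevance for B: every stack entry's remaining depth stays away from 0 within the fuel
def pvOkB (fuel : Nat) (d : Int) (stack : List (pvState × List pvState)) : Prop :=
  ∀ pr ∈ stack, d - ((pr.2.length : Int) - 1) < 0 ∨ (fuel : Int) ≤ d - ((pr.2.length : Int) - 1)

theorem pvFoldlPush (l : List pvState) (path : List pvState)
    (s : List (pvState × List pvState)) :
    l.foldl (fun s n => if n ∈ path then s else (n, path ++ [n]) :: s) s
      = ((l.filter (fun n => n ∉ path)).reverse.map (fun n => (n, path ++ [n]))) ++ s := by
  induction l generalizing s with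
  | nil => rfl
  | cons x xs ih =>
    simp only [List.foldl, List.filter]
    by_cases hx : x ∈ path
    · simp [hx, ih]
    · simp [hx, ih]

theorem pvDlsB_irrel (fuel : Nat) (goal : pvState) (d d' : Int)
    (stack : List (pvState × List pvState))
    (hO : pvOkB fuel d stack) (hO' : pvOkB fuel d' stack) :
    pvDlsB fuel goal d stack = pvDlsB fuel goal d' stack := by
  induction fuel generalizing stack with
  | zero => cases stack <;> rfl
  | succ fuel ih =>
    match stack with
    | [] => rfl
    | (state, path) :: rest =>
      rw [pvDlsB, pvDlsB]
      by_cases hg : state = goal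
      · simp [hg]
      · have hr := hO (state, path) (by simp)
        have hr' := hO' (state, path) (by simp)
        dsimp only at hr hr'
        have hnz : d - ((path.length : Int) - 1) ≠ 0 := by omega
        have hnz' : d' - ((path.length : Int) - 1) ≠ 0 := by omega
        simp only [if_neg hg, if_pos hnz, if_pos hnz']
        apply ih
        · intro pr hpr
          rw [pvFoldlPush] at hpr
          rcases List.mem_append.mp hpr with hin | hin
          · rcases List.mem_map.mp hin with ⟨n, _, rfl⟩
            simp only [List.length_append, List.length_cons, List.length_nil]
            push_cast
            omega
          · have := hO pr (List.mem_cons_of_mem _ hin)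
            omega
        · intro pr hpr
          rw [pvFoldlPush] at hpr
          rcases List.mem_append.mp hpr with hin | hin
          · rcases List.mem_map.mp hin with ⟨n, _, rfl⟩
            simp only [List.length_append, List.length_cons, List.length_nil]
            push_cast
            omega
          · have := hO' pr (List.mem_cons_of_mem _ hin)
            omega

theorem pvDlsB_neg (d : Int) (hd : d < 0 ∨ (64 : Int) ≤ d) :
    pvDlsB 64 pvGoal d [(pvStart, [pvStart])] = some pvP := by
  rw [pvDlsB_irrel 64 pvGoal d (-1) _ ?_ ?_]
  · decide
  · intro pr hpr
    simp at hpr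
    subst hpr
    simp [pvStart]
    omega
  · intro pr hpr
    simp at hpr
    subst hpr
    simp [pvStart]

theorem pvDlsB_small (d : Int) (h0 : 0 ≤ d) (h1 : d ≤ 10) :
    pvDlsB 64 pvGoal d [(pvStart, [pvStart])] = none := by
  interval_cases d <;> decide

theorem pvDlsB_mid (d : Int) (h0 : 11 ≤ d) (h1 : d ≤ 63) :
    pvDlsB 64 pvGoal d [(pvStart, [pvStart])] = some pvP := by
  interval_cases d <;> decide

theorem pvRunLoopB_climb (fuel : Nat) (d : Int) (h0 : 0 ≤ d) (h1 : d ≤ 11)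
    (hf : (12 - d).toNat ≤ fuel) : pvRunLoopB fuel d = (pvP, 11) := by
  induction fuel generalizing d with
  | zero => omega
  | succ fuel ih =>
    rw [pvRunLoopB]
    by_cases h : d ≤ 10
    · rw [pvDlsB_small d h0 h]
      exact ih (d + 1) (by omega) (by omega) (by omega)
    · have : d = 11 := by omega
      subst this
      rw [pvDlsB_mid 11 (by omega) (by omega)]

theorem run_ids_alt_closed (s : Int) :
    run_ids_alt s = (pvP.map (fun st => [st.1, st.2.1, st.2.2]),
                     if 0 ≤ s ∧ s ≤ 10 then 11 else s) := by
  rw [run_ids_alt]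
  by_cases hneg : s < 0
  · rw [pvRunLoopB]
    rw [pvDlsB_neg s (Or.inl hneg)]
    simp [hneg]
  · by_cases hsmall : s ≤ 10
    · rw [pvRunLoopB_climb _ s (by omega) (by omega) (by omega)]
      simp
      omega
    · rw [pvRunLoopB]
      by_cases hmid : s ≤ 63
      · rw [pvDlsB_mid s (by omega) (by omega)]
        simp
        omega
      · rw [pvDlsB_neg s (Or.inr (by omega))]
        simp
        omega

-- ===== VERDICT (by name: the statement is the Claim_ definition above) =====
theorem run_ids_spec : Claim_equal_run_ids := by
  intro s _
  unfold Spec_run_ids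
  rw [run_ids_closed, run_ids_alt_closed]
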